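-- pv_equiv track=rewrite | github.com/ScriptRaccoon/polynomials-python | utils.py | parse_by_operators
-- ===== SOURCE A (Python) =====
-- def remove_spaces(txt: str) -> str:
--     """
--     Removes all spaces inside of a string
--
--     Arguments:
--         txt: any string
--
--     Returns:
--         a string without spaces
--     """
--     return txt.replace(" ", "")
--
-- def parse_by_operators(
--     txt: str, operators: list[str], default: str | None = None
-- ) -> dict:
--     """
--     Parses a string by a list of unary operators.
--     For example, the string "- x + y - z with the operators "+","-"
--     returns the dictionary {"+": ["y"], "-": ["x", "z"]}.
--
--     When a default operator is given, it is added to the start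
--     (when no other operator is present there). For example,
--     "x + y - z" is processed in the same way as "+ x + y - z"
--     when "+" is the default operator.
--
--     Arguments:
--         txt: any string
--         operators: any list of string-encoded operators
--
--     Returns:
--         A dictionary whose keys are the operators and whose value
--         at an operator is the list of substrings to which this operator
--         has been applied in the given string
--     """
--     txt = remove_spaces(txt)
--     if default:
--         txt = add_default_operator(txt, operators, default)
--     res: dict = {operator: [] for operator in operators}
--     current = ""
--     operator = None
--     for index in range(len(txt)):
--         char = txt[index]
--         if char in operators:
--             if operator:
--                 res[operator].append(current)
--                 current = ""
--             operator = char
--         else: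
--             current += char
--     if operator:
--         res[operator].append(current)
--         current = ""
--     return res
--
-- def add_default_operator(txt: str, operators: list[str], default: str) -> str:
--     """
--     Adds a default operator in front of a string, in case no operator is present there.
--
--     For example, when + is the default operator, the other one being -,
--     then x + y is transformed to + x + y, but + x + y and - x + y stay the same.
--
--     Arguments:
--         txt: any string
--         operators: a list of operators
--         default: a default operator
--
--     Returns:
--         the transformed string
--     """
--     if any([txt.lstrip().startswith(operator) for operator in operators]):
--         return txt
--     else:
--         return default + txt
-- ===== SOURCE B (Python) =====
-- def parse_by_operators(txt, operators, default=None):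
--     # Different decomposition: instead of a char-by-char accumulator loop with
--     # inline dict updates, repeatedly find the next operator position and take
--     # slices between consecutive operators (leading prefix merges into the
--     # first operand, exactly as in the original).
--     txt = txt.replace(" ", "")
--     if default and not any(txt.lstrip().startswith(op) for op in operators):
--         txt = default + txt
--     res = {op: [] for op in operators}
--     k = next((i for i, c in enumerate(txt) if c in operators), None)
--     if k is None:
--         return res
--     prefix, op, rest = txt[:k], txt[k], txt[k + 1:]
--     while True:
--         j = next((i for i, c in enumerate(rest) if c in operators), None)
--         if j is None:
--             res[op].append(prefix + rest)
--             return res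
--         res[op].append(prefix + rest[:j])
--         prefix, op, rest = "", rest[j], rest[j + 1:]
-- ===== Notes on version B (the rewrite author's own statement) =====
-- stated objective: alternative
-- what changed: Replaced the char-by-char accumulator loop that interleaves dict updates with a find-next-operator-then-slice loop: each step locates the next operator index and appends the slice between consecutive operators (the leading prefix is prepended to the first operand, as in A).
import Mathlib
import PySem

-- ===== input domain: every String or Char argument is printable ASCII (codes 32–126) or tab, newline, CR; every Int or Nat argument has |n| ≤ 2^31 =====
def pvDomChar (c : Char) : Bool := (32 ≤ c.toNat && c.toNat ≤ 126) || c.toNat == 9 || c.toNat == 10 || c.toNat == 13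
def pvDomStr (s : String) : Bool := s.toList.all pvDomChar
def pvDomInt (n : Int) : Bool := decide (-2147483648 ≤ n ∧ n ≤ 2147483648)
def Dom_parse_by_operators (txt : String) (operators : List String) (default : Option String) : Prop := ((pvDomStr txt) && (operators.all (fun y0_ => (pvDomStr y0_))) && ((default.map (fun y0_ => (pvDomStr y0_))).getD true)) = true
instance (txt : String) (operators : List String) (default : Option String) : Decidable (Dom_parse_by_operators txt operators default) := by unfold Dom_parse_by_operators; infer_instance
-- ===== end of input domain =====

-- Equivalence of two parsers: A accumulates char-by-char with inline dict appends;
-- B repeatedly finds the next operator index and appends slices between consecutive operators.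


-- ===== PORT A =====
-- `char in operators` in Python: the one-char string equals some operator (shared by both ports).
def chIn (operators : List String) (c : Char) : Bool := operators.contains (String.mk [c])

def remove_spaces (txt : String) : String := PySem.Str.replace txt " " ""

def add_default_operator (txt : String) (operators : List String) (default : String) : String :=
  if (operators.map (fun op => PySem.Str.startswith (PySem.Str.lstrip txt) op)).any id then txt
  else default ++ txt

-- `res[operator].append(current)`: the key is always present (operator ∈ operators), so
-- `modify … []` is exactly Python's append-to-existing-entry.
def stepA (operators : List String)
    (st : PySem.Dict String (List String) × List Char × Option String) (char : Char) :
    PySem.Dict String (List String) × List Char × Option String :=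
  let (res, current, operator) := st
  if chIn operators char then
    match operator with
    | some op => (res.modify op [] (· ++ [String.mk current]), [], some (String.mk [char]))
    | none => (res, current, some (String.mk [char]))
  else (res, current ++ [char], operator)

-- `current` is kept as the List Char of the accumulated characters (String.mk at each use).
def parse_by_operators (txt : String) (operators : List String) (default : Option String) : List (String × List String) :=
  let txt1 := remove_spaces txt
  let txt2 := match default with
    | none => txt1
    | some d => if d = "" then txt1 else add_default_operator txt1 operators d
  let res0 : PySem.Dict String (List String) :=
    operators.foldl (fun d op => d.insert op []) PySem.Dict.empty
  let st := txt2.toList.foldl (stepA operators) (res0, [], none)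
  match st.2.2 with
  | some op => (st.1.modify op [] (· ++ [String.mk st.2.1])).items
  | none => st.1.items


theorem pv_drop_lt {α : Type} (rest : List α) (j : Nat) (h : j < rest.length) :
    (rest.drop (j + 1)).length < rest.length := by
  simp [List.length_drop]; omega

-- ===== PORT B =====
-- the while-loop of B: find the next operator index in `rest`, slice, append, recurse.
def loopB (operators : List String) (res : PySem.Dict String (List String))
    (pfx : List Char) (op : String) (rest : List Char) : PySem.Dict String (List String) :=
  match h : rest.findIdx? (chIn operators) with
  | none => res.modify op [] (· ++ [String.mk (pfx ++ rest)])
  | some j =>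
      loopB operators (res.modify op [] (· ++ [String.mk (pfx ++ rest.take j)]))
        [] (String.mk [rest.getD j ' ']) (rest.drop (j + 1))
termination_by rest.length
decreasing_by
  exact pv_drop_lt rest j (List.findIdx?_eq_some_iff_getElem.mp h).1

def parse_by_operators_alt (txt : String) (operators : List String) (default : Option String) : List (String × List String) :=
  let t1 := PySem.Str.replace txt " " ""
  let t2 := match default with
    | none => t1
    | some d =>
        if d ≠ "" ∧ ¬ (operators.any (fun op => PySem.Str.startswith (PySem.Str.lstrip t1) op))
        then d ++ t1 else t1
  let res : PySem.Dict String (List String) :=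
    operators.foldl (fun d op => d.insert op []) PySem.Dict.empty
  let cs := t2.toList
  match cs.findIdx? (chIn operators) with
  | none => res.items
  | some k =>
      (loopB operators res (cs.take k) (String.mk [cs.getD k ' ']) (cs.drop (k + 1))).items

-- ===== PRECONDITION & SPEC =====
def Spec_parse_by_operators (txt : String) (operators : List String) (default : Option String) (out : List (String × List String)) : Prop := out = parse_by_operators_alt txt operators default
instance (txt : String) (operators : List String) (default : Option String) (out : List (String × List String)) : Decidable (Spec_parse_by_operators txt operators default out) := by unfold Spec_parse_by_operators; infer_instance

-- ===== CLAIM (what is proved, stated in full; the proofs are below) =====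
def Claim_equal_parse_by_operators : Prop := ∀ (txt : String) (operators : List String) (default : Option String), Dom_parse_by_operators txt operators default → Spec_parse_by_operators txt operators default (parse_by_operators txt operators default)

-- ===== LEMMAS AND PROOFS =====

-- A's loop over a stretch with no operator characters only accumulates them into `current`.
theorem foldA_no_op (operators : List String) (seg : List Char)
    (hseg : ∀ c ∈ seg, chIn operators c = false)
    (res : PySem.Dict String (List String)) (cur : List Char) (opt : Option String) :
    seg.foldl (stepA operators) (res, cur, opt) = (res, cur ++ seg, opt) := by
  induction seg generalizing cur with
  | nil => simp
  | cons c seg ih =>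
      have hc : chIn operators c = false := hseg c (by simp)
      have hrest : ∀ x ∈ seg, chIn operators x = false := fun x hx => hseg x (by simp [hx])
      simp only [List.foldl_cons, stepA, hc, Bool.false_eq_true, if_false]
      rw [ih hrest]
      simp

-- the decomposition of a list at its first match of `p`.
theorem findIdx?_some_decomp {α : Type} (p : α → Bool) (l : List α) (j : Nat) (d : α)
    (h : l.findIdx? p = some j) :
    j < l.length ∧ (∀ c ∈ l.take j, p c = false) ∧ p (l.getD j d) = true ∧
      l = l.take j ++ l.getD j d :: l.drop (j + 1) := by
  obtain ⟨hj, hp, hmin⟩ := List.findIdx?_eq_some_iff_getElem.mp h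
  have hget : l.getD j d = l[j] := by
    simp [List.getD_eq_getElem?_getD, List.getElem?_eq_getElem hj]
  refine ⟨hj, ?_, by rw [hget]; exact hp, ?_⟩
  · intro c hc
    obtain ⟨i, hi, rfl⟩ := List.mem_take_iff_getElem.mp hc
    have := hmin i (by omega)
    simpa using this
  · rw [hget]
    conv_lhs => rw [← List.take_append_drop j l]
    congr 1
    exact (List.getElem_cons_drop hj).symm

-- unfolding equations for loopB (its match carries a proof binder, so rw needs these).
theorem loopB_none (operators : List String) (res : PySem.Dict String (List String))
    (pfx : List Char) (op : String) (rest : List Char)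
    (h : rest.findIdx? (chIn operators) = none) :
    loopB operators res pfx op rest = res.modify op [] (· ++ [String.mk (pfx ++ rest)]) := by
  rw [loopB]; split
  · rfl
  · simp_all

theorem loopB_some (operators : List String) (res : PySem.Dict String (List String))
    (pfx : List Char) (op : String) (rest : List Char) (j : Nat)
    (h : rest.findIdx? (chIn operators) = some j) :
    loopB operators res pfx op rest =
      loopB operators (res.modify op [] (· ++ [String.mk (pfx ++ rest.take j)]))
        [] (String.mk [rest.getD j ' ']) (rest.drop (j + 1)) := by
  rw [loopB]; split
  · simp_all
  · next j' hj' =>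
      rw [h] at hj'
      cases hj'
      rfl

-- MAIN: from a state (res, cur, operator = op), A's remaining fold + final flush equals B's loop.
theorem foldA_eq_loopB (operators : List String) (rest : List Char)
    (res : PySem.Dict String (List String)) (cur : List Char) (op : String) :
    (match (rest.foldl (stepA operators) (res, cur, some op)).2.2 with
      | some o => ((rest.foldl (stepA operators) (res, cur, some op)).1.modify o []
          (· ++ [String.mk (rest.foldl (stepA operators) (res, cur, some op)).2.1])).items
      | none => (rest.foldl (stepA operators) (res, cur, some op)).1.items)
      = (loopB operators res cur op rest).items := by
  induction hn : rest.length using Nat.strong_induction_on generalizing rest res cur op with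
  | _ n ih =>
    match hidx : rest.findIdx? (chIn operators) with
    | none =>
        have hall : ∀ c ∈ rest, chIn operators c = false := by
          simpa using List.findIdx?_eq_none_iff.mp hidx
        rw [foldA_no_op operators rest hall res cur (some op)]
        rw [loopB_none operators res cur op rest hidx]
    | some j =>
        obtain ⟨hj, htake, hpj, hdecomp⟩ := findIdx?_some_decomp (chIn operators) rest j ' ' hidx
        set c := rest.getD j ' ' with hc
        conv_lhs => rw [hdecomp]
        rw [List.foldl_append, foldA_no_op operators (rest.take j) htake res cur (some op)]
        simp only [List.foldl_cons, stepA, hpj, if_true]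
        have hlen : (rest.drop (j + 1)).length < n := by
          subst hn; exact pv_drop_lt rest j hj
        rw [ih _ hlen (rest.drop (j + 1)) _ [] (String.mk [c]) rfl]
        rw [loopB_some operators res cur op rest j hidx]

-- the two preprocessing formulations agree.
theorem preprocess_eq (txt1 : String) (operators : List String) (default : Option String) :
    (match default with
      | none => txt1
      | some d => if d = "" then txt1 else add_default_operator txt1 operators d)
    = (match default with
      | none => txt1
      | some d =>
          if d ≠ "" ∧ ¬ (operators.any (fun op => PySem.Str.startswith (PySem.Str.lstrip txt1) op))
          then d ++ txt1 else txt1) := by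
  match default with
  | none => rfl
  | some d =>
      simp only [add_default_operator]
      have hA : (operators.map (fun op => PySem.Str.startswith (PySem.Str.lstrip txt1) op)).any id
          = operators.any (fun op => PySem.Str.startswith (PySem.Str.lstrip txt1) op) := by
        simp [List.any_map]
      rw [hA]
      by_cases hd : d = ""
      · simp [hd]
      · by_cases hany : operators.any (fun op => PySem.Str.startswith (PySem.Str.lstrip txt1) op) = true
        · rw [if_neg hd, if_pos hany, if_neg (fun h => h.2 hany)]
        · rw [if_neg hd, if_neg (fun h => hany h), if_pos ⟨hd, hany⟩]

-- ===== VERDICT (by name: the statement is the Claim_ definition above) =====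
theorem parse_by_operators_spec : Claim_equal_parse_by_operators := by
  intro txt operators default _
  unfold Spec_parse_by_operators parse_by_operators parse_by_operators_alt
  simp only [remove_spaces]
  rw [← preprocess_eq]
  set t2 := (match default with
    | none => PySem.Str.replace txt " " ""
    | some d => if d = "" then PySem.Str.replace txt " " ""
        else add_default_operator (PySem.Str.replace txt " " "") operators d) with ht2
  set res0 : PySem.Dict String (List String) :=
    operators.foldl (fun d op => d.insert op []) PySem.Dict.empty with hres0
  set cs := t2.toList with hcs
  match hidx : cs.findIdx? (chIn operators) with
  | none =>
      have hall : ∀ c ∈ cs, chIn operators c = false := by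
        simpa using List.findIdx?_eq_none_iff.mp hidx
      rw [foldA_no_op operators cs hall res0 [] none]
  | some k =>
      obtain ⟨hk, htake, hpk, hdecomp⟩ := findIdx?_some_decomp (chIn operators) cs k ' ' hidx
      set c := cs.getD k ' ' with hc
      conv_lhs => rw [hdecomp]
      rw [List.foldl_append, foldA_no_op operators (cs.take k) htake res0 [] none]
      simp only [List.foldl_cons, stepA, hpk, if_true]
      simp only [List.nil_append]
      rw [foldA_eq_loopB operators (cs.drop (k + 1)) res0 (cs.take k) (String.mk [c])]
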